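-- pv_equiv track=rewrite | github.com/TAKAHASHIMITSUGU329/compatibility-fortune-telling | calculators/socionics.py | _compute_relation_systematic
-- ===== SOURCE A (Python) =====
-- MBTI_TO_SOCIONICS = {
--     # 外向型（J/Pはそのまま）
--     "ENFJ": "EIE",   # 倫理的直観型（メンター）
--     "ENFP": "IEE",   # 直観的倫理型（カウンセラー）
--     "ENTJ": "LIE",   # 論理的直観型（企業家）
--     "ENTP": "ILE",   # 直観的論理型（発明家）
--     "ESFJ": "ESE",   # 倫理的感覚型（熱狂者）
--     "ESFP": "SEE",   # 感覚的倫理型（政治家）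
--     "ESTJ": "LSE",   # 論理的感覚型（管理者）
--     "ESTP": "SLE",   # 感覚的論理型（征服者）
--     # 内向型（J/Pが反転）
--     "INFJ": "EII",   # 倫理的直観型（人道主義者）
--     "INFP": "IEI",   # 直観的倫理型（叙情詩人）
--     "INTJ": "ILI",   # 直観的論理型（批評家）
--     "INTP": "LII",   # 論理的直観型（分析家）
--     "ISFJ": "ESI",   # 倫理的感覚型（守護者）
--     "ISFP": "SEI",   # 感覚的倫理型（仲介者）
--     "ISTJ": "LSI",   # 論理的感覚型（監察官）
--     "ISTP": "SLI",   # 感覚的論理型（職人）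
-- }
--
-- def _compute_relation_systematic(type_a: str, type_b: str) -> str:
--     """体系的にソシオニクスの関係を計算"""
--     # ソシオニクスでは4つの認知機能の「態度」から関係が決まる
--     # 簡略化: MBTIに変換して判定
--
--     # ソシオニクスからMBTIへの逆変換
--     socionics_to_mbti = {v: k for k, v in MBTI_TO_SOCIONICS.items()}
--     mbti_a = socionics_to_mbti.get(type_a, "")
--     mbti_b = socionics_to_mbti.get(type_b, "")
--
--     if not mbti_a or not mbti_b:
--         return "quasi_identical"
--
--     # MBTI次元での比較
--     # E/I, S/N, T/F, J/P
--     same_ei = mbti_a[0] == mbti_b[0]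
--     same_sn = mbti_a[1] == mbti_b[1]
--     same_tf = mbti_a[2] == mbti_b[2]
--     same_jp = mbti_a[3] == mbti_b[3]
--
--     diff_count = sum([not same_ei, not same_sn, not same_tf, not same_jp])
--
--     # 準同一: 1文字だけ異なる（S/NまたはT/F）
--     if diff_count == 1:
--         if not same_sn or not same_tf:
--             return "quasi_identical"
--         if not same_ei:
--             # E/Iだけ異なる = looking-glass or mirror variant
--             return "kindred"
--         if not same_jp:
--             return "kindred"
--
--     # 幻想関係
--     if not same_sn and same_tf and same_ei and not same_jp:
--         return "illusionary"
--
--     # 準双対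
--     if not same_sn and not same_tf and same_ei and same_jp:
--         return "semi_dual"
--
--     # 恩恵関係・監督関係は方向性がある
--     # 簡略化: 3文字以上異なる場合
--     if diff_count >= 3:
--         # 恩恵または監督
--         if same_tf:
--             return "benefit" if mbti_a[0] == "E" else "beneficiary"
--         else:
--             return "supervisor" if mbti_a[0] == "E" else "supervisee"
--
--     # 超自我
--     if not same_sn and not same_tf and not same_ei and same_jp:
--         return "super_ego"
--
--     # その他
--     return "quasi_identical"
-- ===== SOURCE B (Python) =====
-- MBTI_TO_SOCIONICS = {
--     "ENFJ": "EIE", "ENFP": "IEE", "ENTJ": "LIE", "ENTP": "ILE",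
--     "ESFJ": "ESE", "ESFP": "SEE", "ESTJ": "LSE", "ESTP": "SLE",
--     "INFJ": "EII", "INFP": "IEI", "INTJ": "ILI", "INTP": "LII",
--     "ISFJ": "ESI", "ISFP": "SEI", "ISTJ": "LSI", "ISTP": "SLI",
-- }
--
-- # dispatch table keyed by (diff_ei, diff_sn, diff_tf, diff_jp, mbti_a starts with 'E');
-- # missing keys mean "quasi_identical"
-- _RELATION_TABLE = {
--     (True,  False, False, False, True):  "kindred",
--     (True,  False, False, False, False): "kindred",
--     (False, False, False, True,  True):  "kindred",
--     (False, False, False, True,  False): "kindred",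
--     (False, True,  False, True,  True):  "illusionary",
--     (False, True,  False, True,  False): "illusionary",
--     (False, True,  True,  False, True):  "semi_dual",
--     (False, True,  True,  False, False): "semi_dual",
--     (True,  True,  False, True,  True):  "benefit",
--     (True,  True,  False, True,  False): "beneficiary",
--     (True,  True,  True,  False, True):  "supervisor",
--     (True,  True,  True,  False, False): "supervisee",
--     (True,  False, True,  True,  True):  "supervisor",
--     (True,  False, True,  True,  False): "supervisee",
--     (False, True,  True,  True,  True):  "supervisor",
--     (False, True,  True,  True,  False): "supervisee",
--     (True,  True,  True,  True,  True):  "supervisor",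
--     (True,  True,  True,  True,  False): "supervisee",
-- }
--
-- def _compute_relation_systematic(type_a: str, type_b: str) -> str:
--     socionics_to_mbti = {v: k for k, v in MBTI_TO_SOCIONICS.items()}
--     mbti_a = socionics_to_mbti.get(type_a, "")
--     mbti_b = socionics_to_mbti.get(type_b, "")
--     if not mbti_a or not mbti_b:
--         return "quasi_identical"
--     key = tuple(a != b for a, b in zip(mbti_a, mbti_b)) + (mbti_a[0] == "E",)
--     return _RELATION_TABLE.get(key, "quasi_identical")
-- ===== Notes on version B (the rewrite author's own statement) =====
-- stated objective: simpler
-- what changed: Replaced A's multi-stage if/elif cascade (diff-count special-casing, illusionary/semi-dual/benefit/supervisor branches, dead super_ego branch) by a single precomputed dispatch table keyed by the four per-letter difference flags plus the extravert flag, looked up with a 'quasi_identical' default.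
import Mathlib
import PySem

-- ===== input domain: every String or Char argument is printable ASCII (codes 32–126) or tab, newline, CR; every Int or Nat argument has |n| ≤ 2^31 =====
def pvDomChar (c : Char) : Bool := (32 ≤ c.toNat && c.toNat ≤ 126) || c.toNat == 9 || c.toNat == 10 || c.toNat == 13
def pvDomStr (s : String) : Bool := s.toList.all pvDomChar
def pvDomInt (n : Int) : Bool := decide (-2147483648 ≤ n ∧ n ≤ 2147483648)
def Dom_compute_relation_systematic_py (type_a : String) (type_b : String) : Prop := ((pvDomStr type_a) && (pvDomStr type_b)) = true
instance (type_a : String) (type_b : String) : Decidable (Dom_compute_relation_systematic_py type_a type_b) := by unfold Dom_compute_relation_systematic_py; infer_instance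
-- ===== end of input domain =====

-- B replaces A's if/elif cascade by one precomputed dispatch table keyed by the four
-- difference flags plus the extravert flag (objective: simpler).

-- shared data: MBTI_TO_SOCIONICS (module constant used by both Pythons)
def pvMbtiToSocionics : List (String × String) :=
  [("ENFJ", "EIE"), ("ENFP", "IEE"), ("ENTJ", "LIE"), ("ENTP", "ILE"),
   ("ESFJ", "ESE"), ("ESFP", "SEE"), ("ESTJ", "LSE"), ("ESTP", "SLE"),
   ("INFJ", "EII"), ("INFP", "IEI"), ("INTJ", "ILI"), ("INTP", "LII"),
   ("ISFJ", "ESI"), ("ISFP", "SEI"), ("ISTJ", "LSI"), ("ISTP", "SLI")]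

-- socionics_to_mbti = {v: k for k, v in MBTI_TO_SOCIONICS.items()} and its .get(·, "")
-- (identical dict comprehension in both A and B, hence shared)
def pvSocToMbti : PySem.Dict String String :=
  PySem.Dict.ofList (pvMbtiToSocionics.map (fun kv => (kv.2, kv.1)))

-- ===== PORT A =====
-- cascade of A after the lookups (the guard `not mbti_a or not mbti_b` and the if/elif
-- chain, step for step; string indexing mbti_a[0] is in range here, ported via pyGet?)
def pvCascadeA (mbti_a : String) (mbti_b : String) : String :=
  if mbti_a = "" || mbti_b = "" then "quasi_identical"
  else
    let same_ei := PySem.Str.pyGet? mbti_a 0 == PySem.Str.pyGet? mbti_b 0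
    let same_sn := PySem.Str.pyGet? mbti_a 1 == PySem.Str.pyGet? mbti_b 1
    let same_tf := PySem.Str.pyGet? mbti_a 2 == PySem.Str.pyGet? mbti_b 2
    let same_jp := PySem.Str.pyGet? mbti_a 3 == PySem.Str.pyGet? mbti_b 3
    let diff_count : Int := (if same_ei then 0 else 1) + (if same_sn then 0 else 1)
      + (if same_tf then 0 else 1) + (if same_jp then 0 else 1)
    -- the clauses after the `diff_count == 1` block (reached by fall-through too)
    let rest : String :=
      if !same_sn && same_tf && same_ei && !same_jp then "illusionary"
      else if !same_sn && !same_tf && same_ei && same_jp then "semi_dual"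
      else if diff_count ≥ 3 then
        (if same_tf then (if PySem.Str.pyGet? mbti_a 0 == some 'E' then "benefit" else "beneficiary")
         else (if PySem.Str.pyGet? mbti_a 0 == some 'E' then "supervisor" else "supervisee"))
      else if !same_sn && !same_tf && !same_ei && same_jp then "super_ego"
      else "quasi_identical"
    if diff_count = 1 then
      if !same_sn || !same_tf then "quasi_identical"
      else if !same_ei then "kindred"
      else if !same_jp then "kindred"
      else rest
    else rest

def compute_relation_systematic_py (type_a : String) (type_b : String) : String :=
  pvCascadeA (pvSocToMbti.getD type_a "") (pvSocToMbti.getD type_b "")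

-- ===== PORT B =====
-- _RELATION_TABLE: key = (diff_ei, diff_sn, diff_tf, diff_jp, mbti_a starts with 'E')
def pvRelationTable : PySem.Dict (Bool × Bool × Bool × Bool × Bool) String :=
  PySem.Dict.ofList
    [((true,  false, false, false, true),  "kindred"),
     ((true,  false, false, false, false), "kindred"),
     ((false, false, false, true,  true),  "kindred"),
     ((false, false, false, true,  false), "kindred"),
     ((false, true,  false, true,  true),  "illusionary"),
     ((false, true,  false, true,  false), "illusionary"),
     ((false, true,  true,  false, true),  "semi_dual"),
     ((false, true,  true,  false, false), "semi_dual"),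
     ((true,  true,  false, true,  true),  "benefit"),
     ((true,  true,  false, true,  false), "beneficiary"),
     ((true,  true,  true,  false, true),  "supervisor"),
     ((true,  true,  true,  false, false), "supervisee"),
     ((true,  false, true,  true,  true),  "supervisor"),
     ((true,  false, true,  true,  false), "supervisee"),
     ((false, true,  true,  true,  true),  "supervisor"),
     ((false, true,  true,  true,  false), "supervisee"),
     ((true,  true,  true,  true,  true),  "supervisor"),
     ((true,  true,  true,  true,  false), "supervisee")]

-- B after the lookups: build the key tuple from the zipped character differences
-- (the match packs the 4-element zip into a tuple; both strings have length 4 here)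
def pvTableB (mbti_a : String) (mbti_b : String) : String :=
  if mbti_a = "" || mbti_b = "" then "quasi_identical"
  else
    match (mbti_a.toList.zip mbti_b.toList).map (fun p => p.1 != p.2) with
    | [d1, d2, d3, d4] =>
        pvRelationTable.getD (d1, d2, d3, d4, PySem.Str.pyGet? mbti_a 0 == some 'E')
          "quasi_identical"
    | _ => "quasi_identical"

def compute_relation_systematic_py_alt (type_a : String) (type_b : String) : String :=
  pvTableB (pvSocToMbti.getD type_a "") (pvSocToMbti.getD type_b "")

-- ===== PRECONDITION & SPEC =====
def Spec_compute_relation_systematic_py (type_a : String) (type_b : String) (out : String) : Prop := out = compute_relation_systematic_py_alt type_a type_b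
instance (type_a : String) (type_b : String) (out : String) : Decidable (Spec_compute_relation_systematic_py type_a type_b out) := by unfold Spec_compute_relation_systematic_py; infer_instance

-- ===== CLAIM (what is proved, stated in full; the proofs are below) =====
def Claim_equal_compute_relation_systematic_py : Prop := ∀ (type_a : String) (type_b : String), Dom_compute_relation_systematic_py type_a type_b → Spec_compute_relation_systematic_py type_a type_b (compute_relation_systematic_py type_a type_b)

-- ===== LEMMAS AND PROOFS =====

-- the 17 possible results of the socionics→MBTI lookup
def pvMbtiRange : List String := "" :: pvMbtiToSocionics.map (fun kv => kv.1)

-- a getD on a literal dict returns the default or one of the stored values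
theorem pv_getD_mk_mem {κ ν : Type} [BEq κ] (l : List (κ × ν)) (k : κ) (dflt : ν) :
    (PySem.Dict.mk l).getD k dflt ∈ dflt :: l.map (fun p => p.2) := by
  induction l with
  | nil => simp [PySem.Dict.getD_eq_get?_getD, PySem.Dict.get?]
  | cons p rest ih =>
    rw [PySem.Dict.getD_eq_get?_getD, PySem.Dict.get?_mk_cons]
    by_cases h : (p.1 == k) = true
    · simp [h]
    · simp only [h]
      rw [if_neg (by simp), ← PySem.Dict.getD_eq_get?_getD]
      rcases List.mem_cons.mp ih with h1 | h1 <;> simp [h1]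

theorem pv_lookup_mem (s : String) : pvSocToMbti.getD s "" ∈ pvMbtiRange := by
  have h : pvSocToMbti = PySem.Dict.mk
      [("EIE", "ENFJ"), ("IEE", "ENFP"), ("LIE", "ENTJ"), ("ILE", "ENTP"),
       ("ESE", "ESFJ"), ("SEE", "ESFP"), ("LSE", "ESTJ"), ("SLE", "ESTP"),
       ("EII", "INFJ"), ("IEI", "INFP"), ("ILI", "INTJ"), ("LII", "INTP"),
       ("ESI", "ISFJ"), ("SEI", "ISFP"), ("LSI", "ISTJ"), ("SLI", "ISTP")] := by decide
  rw [h]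
  have := pv_getD_mk_mem
      [("EIE", "ENFJ"), ("IEE", "ENFP"), ("LIE", "ENTJ"), ("ILE", "ENTP"),
       ("ESE", "ESFJ"), ("SEE", "ESFP"), ("LSE", "ESTJ"), ("SLE", "ESTP"),
       ("EII", "INFJ"), ("IEI", "INFP"), ("ILI", "INTJ"), ("LII", "INTP"),
       ("ESI", "ISFJ"), ("SEI", "ISFP"), ("LSI", "ISTJ"), ("SLI", "ISTP")] s ""
  simpa [pvMbtiRange, pvMbtiToSocionics] using this

theorem pv_core_eq : ∀ ma ∈ pvMbtiRange, ∀ mb ∈ pvMbtiRange,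
    pvCascadeA ma mb = pvTableB ma mb := by decide

-- ===== VERDICT (by name: the statement is the Claim_ definition above) =====
theorem compute_relation_systematic_py_spec : Claim_equal_compute_relation_systematic_py := by
  intro type_a type_b _
  unfold Spec_compute_relation_systematic_py
  exact pv_core_eq _ (pv_lookup_mem type_a) _ (pv_lookup_mem type_b)
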